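-- pv_equiv track=rewrite | github.com/CyberCoders378-CoP/Season06 | 1a_RPG_BattleLogParser/e1a_generator.py | plan_encounter_sizes_exact
-- ===== SOURCE A (Python) =====
-- from typing import List
--
-- def plan_encounter_sizes_exact(total_lines: int, num_potions: int, min_enc: int, max_enc: int) -> List[int]:
--     L = total_lines - num_potions
--     if L <= 0:
--         return []
--     n = (L + max_enc - 1) // max_enc  # ceil(L / max_enc)
--     while n * min_enc > L:
--         n -= 1
--     if n <= 0:
--         n = 1
--     base = [min_enc] * n
--     remaining = L - n * min_enc
--     i = 0
--     while remaining > 0: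
--         if base[i] < max_enc:
--             base[i] += 1
--             remaining -= 1
--         i = (i + 1) % n
--     return base
-- ===== SOURCE B (Python) =====
-- def plan_encounter_sizes_exact(total_lines, num_potions, min_enc, max_enc):
--     L = total_lines - num_potions
--     if L <= 0:
--         return []
--     n = -((-L) // max_enc)  # ceil(L / max_enc)
--     if n * min_enc > L:
--         n = max(L // min_enc, 1)
--     remaining = L - n * min_enc
--     if remaining <= 0:
--         return [min_enc] * n
--     q, r = divmod(remaining, n)
--     return [min_enc + q + 1] * r + [min_enc + q] * (n - r)
-- ===== Notes on version B (the rewrite author's own statement) =====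
-- stated objective: alternative
-- what changed: Replaces A's two loops (a unit-decrement search for the encounter count n and a round-robin +1 distribution loop) with closed-form floor-division arithmetic: n from one ceiling division (corrected once by L//min_enc), then q,r = divmod(remaining,n) and the sizes built as r copies of min_enc+q+1 followed by n-r copies of min_enc+q; the cap provably never binds.
-- outside the precondition, e.g. on plan_encounter_sizes_exact(24, 17, 11, -5): A returns [11], B returns []
import Mathlib
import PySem

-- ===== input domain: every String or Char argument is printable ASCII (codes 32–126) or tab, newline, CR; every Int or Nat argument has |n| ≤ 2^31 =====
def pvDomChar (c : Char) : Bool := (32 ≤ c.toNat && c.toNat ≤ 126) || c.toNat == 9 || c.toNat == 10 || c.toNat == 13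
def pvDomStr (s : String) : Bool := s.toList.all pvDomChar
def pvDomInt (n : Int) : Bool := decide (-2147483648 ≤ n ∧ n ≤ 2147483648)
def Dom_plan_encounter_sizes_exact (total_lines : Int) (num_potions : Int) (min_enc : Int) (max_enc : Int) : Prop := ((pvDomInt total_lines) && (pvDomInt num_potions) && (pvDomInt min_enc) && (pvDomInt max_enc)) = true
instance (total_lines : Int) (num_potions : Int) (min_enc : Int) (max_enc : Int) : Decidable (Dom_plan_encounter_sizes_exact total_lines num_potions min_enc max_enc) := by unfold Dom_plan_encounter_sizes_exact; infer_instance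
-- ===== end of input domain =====

-- B replaces A's two while loops (a decrement search for n and a round-robin +1
-- distribution loop) by closed-form floor-division arithmetic; objective: alternative.

-- ===== PORT A =====
-- `while n * min_enc > L: n -= 1` ; fuel bounds the recursion (enough wherever the Python loop terminates)
def pvAWhile1 (L min_enc : Int) : Nat → Int → Int
  | 0, n => n
  | f + 1, n => if n * min_enc > L then pvAWhile1 L min_enc f (n - 1) else n

-- `while remaining > 0: if base[i] < max_enc: base[i] += 1; remaining -= 1; i = (i+1) % n`
def pvAWhile2 (max_enc n : Int) : Nat → List Int → Int → Int → List Int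
  | 0, base, _, _ => base
  | f + 1, base, remaining, i =>
    if remaining > 0 then
      if PySem.List.pyGetD base i 0 < max_enc then
        pvAWhile2 max_enc n f (PySem.List.pySetD base i (PySem.List.pyGetD base i 0 + 1))
          (remaining - 1) (PySem.Int.mod (i + 1) n)
      else
        pvAWhile2 max_enc n f base remaining (PySem.Int.mod (i + 1) n)
    else base

def plan_encounter_sizes_exact (total_lines : Int) (num_potions : Int) (min_enc : Int) (max_enc : Int) : List Int :=
  let L := total_lines - num_potions
  if L ≤ 0 then []
  else
    let n0 := PySem.Int.floordiv (L + max_enc - 1) max_enc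
    let n1 := pvAWhile1 L min_enc (n0.toNat + 1) n0
    let n := if n1 ≤ 0 then 1 else n1
    let base := List.replicate n.toNat min_enc
    let remaining := L - n * min_enc
    pvAWhile2 max_enc n (remaining.toNat + 1) base remaining 0

-- ===== PORT B =====
def plan_encounter_sizes_exact_alt (total_lines : Int) (num_potions : Int) (min_enc : Int) (max_enc : Int) : List Int :=
  let L := total_lines - num_potions
  if L ≤ 0 then []
  else
    let n0 := -(PySem.Int.floordiv (-L) max_enc)
    let n := if n0 * min_enc > L then max (PySem.Int.floordiv L min_enc) 1 else n0
    let remaining := L - n * min_enc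
    if remaining ≤ 0 then List.replicate n.toNat min_enc
    else
      let q := PySem.Int.floordiv remaining n
      let r := PySem.Int.mod remaining n
      List.replicate r.toNat (min_enc + q + 1) ++ List.replicate ((n - r)).toNat (min_enc + q)

-- ===== PRECONDITION & SPEC =====
-- Pre_ excludes only inputs where A does not return normally, plus the non-natural domain
-- max_enc ≤ 0 (with L > 0): there A raises ZeroDivisionError (max_enc = 0) or loops forever for
-- almost all inputs, and its occasional return of [min_enc] for a NEGATIVE capacity max_enc is an
-- accident of its n ≤ 0 fallback outside the task's natural domain. The remaining conjunct is the
-- feasibility condition (L fits below the cap for the chosen n) without which A's distribution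
-- loop never terminates.
def Pre_plan_encounter_sizes_exact (total_lines : Int) (num_potions : Int) (min_enc : Int) (max_enc : Int) : Prop :=
  let L := total_lines - num_potions
  L ≤ 0 ∨ (1 ≤ max_enc ∧
    (let n0 := PySem.Int.floordiv (L + max_enc - 1) max_enc
     let n := if n0 * min_enc ≤ L then n0 else max (PySem.Int.floordiv L min_enc) 1
     L ≤ n * max_enc ∨ L ≤ n * min_enc))
instance (total_lines : Int) (num_potions : Int) (min_enc : Int) (max_enc : Int) : Decidable (Pre_plan_encounter_sizes_exact total_lines num_potions min_enc max_enc) := by unfold Pre_plan_encounter_sizes_exact; infer_instance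

def pvWitness_plan_encounter_sizes_exact : Int × Int × Int × Int := (10, 2, 2, 3)

def Spec_plan_encounter_sizes_exact (total_lines : Int) (num_potions : Int) (min_enc : Int) (max_enc : Int) (out : List Int) : Prop := out = plan_encounter_sizes_exact_alt total_lines num_potions min_enc max_enc
instance (total_lines : Int) (num_potions : Int) (min_enc : Int) (max_enc : Int) (out : List Int) : Decidable (Spec_plan_encounter_sizes_exact total_lines num_potions min_enc max_enc out) := by unfold Spec_plan_encounter_sizes_exact; infer_instance

-- ===== CLAIM (what is proved, stated in full; the proofs are below) =====
def Claim_equal_plan_encounter_sizes_exact : Prop := ∀ (total_lines : Int) (num_potions : Int) (min_enc : Int) (max_enc : Int), Dom_plan_encounter_sizes_exact total_lines num_potions min_enc max_enc → Pre_plan_encounter_sizes_exact total_lines num_potions min_enc max_enc → Spec_plan_encounter_sizes_exact total_lines num_potions min_enc max_enc (plan_encounter_sizes_exact total_lines num_potions min_enc max_enc)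

-- ===== LEMMAS AND PROOFS =====

-- the balanced list after p full round-robin passes and j extra increments
def pvMkbase (mn : Int) (n j p : Nat) : List Int :=
  List.replicate j (mn + p + 1) ++ List.replicate (n - j) (mn + p)

theorem pvAWhile1_done (L mn : Int) (f : Nat) (n : Int) (h : ¬ n * mn > L) :
    pvAWhile1 L mn f n = n := by
  cases f <;> simp [pvAWhile1, h]

theorem pvAWhile1_run (L mn : Int) (hmn : 1 ≤ mn) (hL : 0 ≤ L) :
    ∀ (f : Nat) (n : Int), n * mn > L → n.toNat ≤ f →
      pvAWhile1 L mn f n = PySem.Int.floordiv L mn := by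
  intro f
  induction f with
  | zero =>
    intro n hgt hle
    exfalso
    have hn0 : n ≤ 0 := by omega
    nlinarith
  | succ f ih =>
    intro n hgt hle
    have hn1 : 1 ≤ n := by nlinarith
    rw [pvAWhile1, if_pos hgt]
    by_cases h2 : (n - 1) * mn > L
    · exact ih (n - 1) h2 (by omega)
    · rw [pvAWhile1_done L mn f (n - 1) h2]
      symm
      rw [PySem.Int.floordiv_eq_iff_of_pos (by omega)]
      constructor
      · omega
      · nlinarith

theorem pvMkbase_get (mn : Int) (n j p : Nat) (hj : j < n) :
    PySem.List.pyGetD (pvMkbase mn n j p) (j : Int) 0 = mn + p := by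
  simp [pvMkbase, List.getD, hj]

theorem pvMkbase_set (mn : Int) (n j p : Nat) (hj : j < n) :
    PySem.List.pySetD (pvMkbase mn n j p) (j : Int) (mn + p + 1) = pvMkbase mn n (j + 1) p := by
  obtain ⟨k, hk⟩ : ∃ k, n - j = k + 1 := ⟨n - j - 1, by omega⟩
  have hk2 : n - (j + 1) = k := by omega
  simp [pvMkbase, hk, hk2, List.replicate_succ]
  rw [List.append_cons, ← List.replicate_succ', List.replicate_succ]
  simp

theorem pvMkbase_full (mn : Int) (n p : Nat) : pvMkbase mn n n p = pvMkbase mn n 0 (p + 1) := by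
  have h : mn + (p : Int) + 1 = mn + ((p + 1 : Nat) : Int) := by push_cast; ring
  simp [pvMkbase, h]

theorem pvAWhile2_run (mn mx : Int) (n : Nat) (hn : 1 ≤ n) :
    ∀ (f : Nat) (rem : Int) (p j : Nat) (_ : j < n) (_ : 0 ≤ rem)
      (_ : rem + (p : Int) * n + j ≤ (n : Int) * (mx - mn)) (_ : rem.toNat ≤ f),
      pvAWhile2 mx (n : Int) f (pvMkbase mn n j p) rem (j : Int) =
        pvMkbase mn n ((p * n + j + rem.toNat) % n) ((p * n + j + rem.toNat) / n) := by
  have hfin : ∀ (p j : Nat), j < n →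
      pvMkbase mn n j p = pvMkbase mn n ((p * n + j) % n) ((p * n + j) / n) := by
    intro p j hj
    have h1 : (p * n + j) % n = j := by
      rw [Nat.add_comm, Nat.add_mul_mod_self_right]; exact Nat.mod_eq_of_lt hj
    have h2 : (p * n + j) / n = p := by
      rw [Nat.add_comm, Nat.add_mul_div_right _ _ (by omega), Nat.div_eq_of_lt hj]; omega
    rw [h1, h2]
  intro f
  induction f with
  | zero =>
    intro rem p j hj hr hub hf
    have : rem = 0 := by omega
    subst this
    simpa [pvAWhile2] using hfin p j hj
  | succ f ih =>
    intro rem p j hj hr hub hf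
    by_cases hpos : rem > 0
    · have hplt : mn + (p : Int) < mx := by nlinarith
      rw [pvAWhile2, if_pos hpos, pvMkbase_get mn n j p hj, if_pos hplt,
        pvMkbase_set mn n j p hj]
      have hmod : PySem.Int.mod ((j : Int) + 1) (n : Int) = (((j + 1) % n : Nat) : Int) := by
        push_cast
        exact_mod_cast PySem.Int.mod_natCast (j + 1) n
      rw [hmod]
      by_cases hjn : j + 1 < n
      · have hmod2 : (j + 1) % n = j + 1 := Nat.mod_eq_of_lt hjn
        rw [hmod2]
        have := ih (rem - 1) p (j + 1) hjn (by omega) (by push_cast; omega)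
          (by omega)
        rw [this]
        have harg : p * n + (j + 1) + (rem - 1).toNat = p * n + j + rem.toNat := by omega
        rw [harg]
      · have hjn2 : j + 1 = n := by omega
        rw [hjn2, Nat.mod_self, pvMkbase_full]
        have := ih (rem - 1) (p + 1) 0 (by omega) (by omega)
          (by push_cast; nlinarith) (by omega)
        rw [Nat.cast_zero]
        rw [Nat.cast_zero] at this
        rw [this]
        have harg : (p + 1) * n + 0 + (rem - 1).toNat = p * n + j + rem.toNat := by
          have : j = n - 1 := by omega
          subst this
          have h1 : (p + 1) * n = p * n + n := by ring
          omega
        rw [harg]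
    · have : rem = 0 := by omega
      subst this
      simpa [pvAWhile2] using hfin p j hj

-- ===== VERDICT (by name: the statement is the Claim_ definition above) =====
theorem pvFinish (mn mx L N : Int) (hN : 1 ≤ N) (_hL : 0 < L)
    (hfeas : L ≤ N * mx ∨ L ≤ N * mn) :
    pvAWhile2 mx N ((L - N * mn).toNat + 1) (List.replicate N.toNat mn) (L - N * mn) 0 =
      (if L - N * mn ≤ 0 then List.replicate N.toNat mn
       else
         List.replicate (PySem.Int.mod (L - N * mn) N).toNat
             (mn + PySem.Int.floordiv (L - N * mn) N + 1) ++
           List.replicate ((N - PySem.Int.mod (L - N * mn) N)).toNat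
             (mn + PySem.Int.floordiv (L - N * mn) N)) := by
  by_cases hrem : L - N * mn ≤ 0
  · rw [if_pos hrem]
    have h0 : (L - N * mn).toNat = 0 := by omega
    rw [h0, pvAWhile2, if_neg (by omega)]
  · rw [if_neg hrem]
    have hrpos : 0 < L - N * mn := by omega
    set rem := L - N * mn with hremdef
    set N' := N.toNat with hN'
    have hNcast : (N' : Int) = N := by omega
    have hremcast : ((rem.toNat : Int)) = rem := by omega
    have hbase : List.replicate N' mn = pvMkbase mn N' 0 0 := by simp [pvMkbase]
    have hub : rem + ((0 : Nat) : Int) * ((N' : Nat) : Int) + ((0 : Nat) : Int) ≤ ((N' : Nat) : Int) * (mx - mn) := by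
      rcases hfeas with h | h
      · push_cast
        rw [hNcast]
        nlinarith
      · omega
    have hrun := pvAWhile2_run mn mx N' (by omega) (rem.toNat + 1) rem 0 0 (by omega) (by omega)
      hub (by omega)
    simp only [Nat.zero_mul, Nat.zero_add, Nat.cast_zero, hNcast] at hrun
    rw [hbase, hrun]
    have hmodlt : rem.toNat % N' < N' := Nat.mod_lt _ (by omega)
    have hmod : PySem.Int.mod rem N = ((rem.toNat % N' : Nat) : Int) := by
      rw [← hNcast, ← hremcast]
      exact PySem.Int.mod_natCast rem.toNat N'
    have hdiv : PySem.Int.floordiv rem N = ((rem.toNat / N' : Nat) : Int) := by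
      rw [← hNcast, ← hremcast]
      exact PySem.Int.floordiv_natCast rem.toNat N'
    rw [hmod, hdiv]
    have h1 : (((rem.toNat % N' : Nat) : Int)).toNat = rem.toNat % N' := by omega
    have h2 : ((N - ((rem.toNat % N' : Nat) : Int))).toNat = N' - rem.toNat % N' := by omega
    rw [h1, h2]
    rfl

theorem pvMain (t pnum mn mx : Int) (hpre : Pre_plan_encounter_sizes_exact t pnum mn mx) :
    plan_encounter_sizes_exact t pnum mn mx = plan_encounter_sizes_exact_alt t pnum mn mx := by
  simp only [plan_encounter_sizes_exact, plan_encounter_sizes_exact_alt]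
  by_cases hL : t - pnum ≤ 0
  · simp [hL]
  · rw [if_neg hL, if_neg hL]
    rw [not_le] at hL
    unfold Pre_plan_encounter_sizes_exact at hpre
    simp only [] at hpre
    obtain ⟨hmx, hfeas⟩ := hpre.resolve_left (by omega)
    set L := t - pnum with hLdef
    set n0 := PySem.Int.floordiv (L + mx - 1) mx with hn0
    have hch : n0 * mx ≤ L + mx - 1 ∧ L + mx - 1 < (n0 + 1) * mx :=
      (PySem.Int.floordiv_eq_iff_of_pos (by omega)).mp hn0.symm
    have hup : L ≤ n0 * mx := by nlinarith [hch.2]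
    have hlow : (n0 - 1) * mx < L := by nlinarith [hch.1]
    have hn0pos : 1 ≤ n0 := by nlinarith
    have hB0 : -(PySem.Int.floordiv (-L) mx) = n0 :=
      (PySem.Int.neg_floordiv_neg_eq_iff_of_pos (by omega)).mpr ⟨hlow, hup⟩
    rw [hB0]
    by_cases hc : n0 * mn ≤ L
    · rw [if_pos hc] at hfeas
      rw [pvAWhile1_done L mn (n0.toNat + 1) n0 (by omega),
        if_neg (show ¬ n0 ≤ 0 by omega), if_neg (show ¬ n0 * mn > L by omega)]
      exact pvFinish mn mx L n0 hn0pos (by omega) hfeas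
    · rw [if_neg hc] at hfeas
      have hmn : 1 ≤ mn := by
        by_contra h
        have : n0 * mn ≤ 0 := by nlinarith
        omega
      have hD := pvAWhile1_run L mn hmn (by omega) (n0.toNat + 1) n0 (by omega) (by omega)
      rw [hD]
      set D := PySem.Int.floordiv L mn with hDdef
      have hDnn : 0 ≤ D := by
        rw [hDdef, PySem.Int.floordiv_eq_ediv_of_pos (by omega)]
        exact Int.ediv_nonneg (by omega) (by omega)
      have hsame : (if D ≤ 0 then (1 : Int) else D) = max D 1 := by
        split_ifs <;> omega
      rw [hsame, if_pos (show n0 * mn > L by omega)]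
      exact pvFinish mn mx L (max D 1) (by omega) (by omega) hfeas

theorem plan_encounter_sizes_exact_spec : Claim_equal_plan_encounter_sizes_exact := by
  intro t pnum mn mx _ hpre
  exact pvMain t pnum mn mx hpre
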